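-- pv_equiv track=rewrite | github.com/bearonyeon/pii-detection-system-main | backend-guideline/main.py | generate_guideline
-- ===== SOURCE A (Python) =====
-- def generate_guideline(findings: list) -> str:
--     """발견된 개인정보 항목 중 가장 높은 점수를 기준으로 맞춤 가이드라인 생성"""
--     if not findings:
--         return "탐지된 개인정보가 없습니다. 안전하게 관리하시기 바랍니다."
--
--     max_score = max([f['score'] for f in findings]) if findings else 0
--
--     if max_score >= 10:
--         return (
--             "[심각] 고유 식별 정보 및 민감 정보(주민번호, 여권 등)가 탐지되었습니다. "
--             "권장 조치: 업로드 즉시 차단, 데이터 암호화 저장, 목적 달성 시 즉시 삭제를 권고합니다."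
--         )
--     elif max_score >= 8:
--         return (
--             "[위험] 금융 정보 및 생체 정보(카드, 계좌, 생체인식 등)가 탐지되었습니다. "
--             "권장 조치: 업로드 차단 검토, 암호화 필수, 일정 기간 내 삭제 및 보안 관리를 권고합니다."
--         )
--     elif max_score >= 5:
--         return (
--             "[주의] 직접 식별 가능 정보(이름, 상세 주소, 휴대폰 번호)가 탐지되었습니다. "
--             "권장 조치: 불필요한 항목 삭제, 데이터 마스킹 처리, 최소한의 공유 범위 설정을 권고합니다."
--         )
--     elif max_score >= 3:
--         return (
--             "[관심] 간접 식별 정보(IP, MAC 주소, 로그 등)가 탐지되었습니다. "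
--             "권장 조치: 데이터 보관 기간 축소, 시스템 접근 권한 최소화 및 주기적인 로그 점검을 권고합니다."
--         )
--     else:
--         return "기타 개인정보 항목이 탐지되었습니다. 내부 보안 지침을 준수하시기 바랍니다."
-- ===== SOURCE B (Python) =====
-- _MESSAGES = [
--     "기타 개인정보 항목이 탐지되었습니다. 내부 보안 지침을 준수하시기 바랍니다.",
--     (
--         "[관심] 간접 식별 정보(IP, MAC 주소, 로그 등)가 탐지되었습니다. "
--         "권장 조치: 데이터 보관 기간 축소, 시스템 접근 권한 최소화 및 주기적인 로그 점검을 권고합니다."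
--     ),
--     (
--         "[주의] 직접 식별 가능 정보(이름, 상세 주소, 휴대폰 번호)가 탐지되었습니다. "
--         "권장 조치: 불필요한 항목 삭제, 데이터 마스킹 처리, 최소한의 공유 범위 설정을 권고합니다."
--     ),
--     (
--         "[위험] 금융 정보 및 생체 정보(카드, 계좌, 생체인식 등)가 탐지되었습니다. "
--         "권장 조치: 업로드 차단 검토, 암호화 필수, 일정 기간 내 삭제 및 보안 관리를 권고합니다."
--     ),
--     (
--         "[심각] 고유 식별 정보 및 민감 정보(주민번호, 여권 등)가 탐지되었습니다. "
--         "권장 조치: 업로드 즉시 차단, 데이터 암호화 저장, 목적 달성 시 즉시 삭제를 권고합니다."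
--     ),
-- ]
--
--
-- def _level(score):
--     """Severity level 0..4 of a single score: how many ladder rungs it clears."""
--     lvl = 0
--     for b in (3, 5, 8, 10):
--         if score < b:
--             break
--         lvl += 1
--     return lvl
--
--
-- def generate_guideline(findings: list) -> str:
--     """One pass: classify each finding into a level, keep the highest, stop early at the top level."""
--     if not findings:
--         return "탐지된 개인정보가 없습니다. 안전하게 관리하시기 바랍니다."
--     best = 0
--     for f in findings:
--         lvl = _level(f['score'])
--         if lvl > best:
--             best = lvl
--             if best == 4:
--                 break
--     return _MESSAGES[best]
-- ===== Notes on version B (the rewrite author's own statement) =====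
-- stated objective: alternative
-- what changed: Instead of taking max() of all scores and pushing it through an if/elif cascade, B classifies each finding individually into a severity level 0..4 (a per-score ladder climb), keeps the highest level seen in a single accumulator pass with early exit at the top level, and indexes a message table by that level.
import Mathlib
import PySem

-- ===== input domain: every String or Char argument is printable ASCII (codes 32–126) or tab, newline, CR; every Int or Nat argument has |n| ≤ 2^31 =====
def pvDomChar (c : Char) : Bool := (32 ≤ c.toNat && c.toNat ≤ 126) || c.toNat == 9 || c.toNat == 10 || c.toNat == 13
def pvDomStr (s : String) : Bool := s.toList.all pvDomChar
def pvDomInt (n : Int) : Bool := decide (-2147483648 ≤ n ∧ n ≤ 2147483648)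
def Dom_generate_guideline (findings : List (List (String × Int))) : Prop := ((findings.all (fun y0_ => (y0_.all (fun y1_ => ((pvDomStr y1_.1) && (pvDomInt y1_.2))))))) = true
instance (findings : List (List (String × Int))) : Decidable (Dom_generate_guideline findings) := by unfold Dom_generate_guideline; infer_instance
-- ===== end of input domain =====

-- B replaces A's max()-then-if/elif cascade by a single accumulator pass that classifies each
-- finding into a severity level (per-score ladder climb) and indexes a message table (alternative; same cost).

-- shared message literals (same strings in both Pythons)
def pvMsgEmpty : String := "탐지된 개인정보가 없습니다. 안전하게 관리하시기 바랍니다."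
def pvMsg10 : String := "[심각] 고유 식별 정보 및 민감 정보(주민번호, 여권 등)가 탐지되었습니다. 권장 조치: 업로드 즉시 차단, 데이터 암호화 저장, 목적 달성 시 즉시 삭제를 권고합니다."
def pvMsg8 : String := "[위험] 금융 정보 및 생체 정보(카드, 계좌, 생체인식 등)가 탐지되었습니다. 권장 조치: 업로드 차단 검토, 암호화 필수, 일정 기간 내 삭제 및 보안 관리를 권고합니다."
def pvMsg5 : String := "[주의] 직접 식별 가능 정보(이름, 상세 주소, 휴대폰 번호)가 탐지되었습니다. 권장 조치: 불필요한 항목 삭제, 데이터 마스킹 처리, 최소한의 공유 범위 설정을 권고합니다."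
def pvMsg3 : String := "[관심] 간접 식별 정보(IP, MAC 주소, 로그 등)가 탐지되었습니다. 권장 조치: 데이터 보관 기간 축소, 시스템 접근 권한 최소화 및 주기적인 로그 점검을 권고합니다."
def pvMsgElse : String := "기타 개인정보 항목이 탐지되었습니다. 내부 보안 지침을 준수하시기 바랍니다."

-- f['score'] on an association-list dict (used by both Pythons)
def pvScore (f : List (String × Int)) : Int := (PySem.Dict.mk f).getD "score" 0

-- ===== PORT A =====
def generate_guideline (findings : List (List (String × Int))) : String :=
  if findings = [] then pvMsgEmpty
  else
    -- max([f['score'] for f in findings]); nonempty here, so getD 0 is never taken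
    let max_score : Int := ((PySem.List.max? (findings.map pvScore) (fun x => x)).getD 0)
    if max_score ≥ 10 then pvMsg10
    else if max_score ≥ 8 then pvMsg8
    else if max_score ≥ 5 then pvMsg5
    else if max_score ≥ 3 then pvMsg3
    else pvMsgElse

-- ===== PORT B =====
def pvMessages : List String := [pvMsgElse, pvMsg3, pvMsg5, pvMsg8, pvMsg10]

-- the 'for b in (3,5,8,10): if score < b: break; lvl += 1' loop of _level
def pvLevelGo (score : Int) : List Int → Nat → Nat
  | [], lvl => lvl
  | b :: rest, lvl => if score < b then lvl else pvLevelGo score rest (lvl + 1)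

def pvLevel (score : Int) : Nat := pvLevelGo score [3, 5, 8, 10] 0

-- the accumulator loop of B, with the 'break' on reaching level 4
def pvBestGo : List (List (String × Int)) → Nat → Nat
  | [], best => best
  | f :: rest, best =>
      let lvl := pvLevel (pvScore f)
      if lvl > best then (if lvl = 4 then 4 else pvBestGo rest lvl) else pvBestGo rest best

def generate_guideline_alt (findings : List (List (String × Int))) : String :=
  if findings = [] then pvMsgEmpty
  else (PySem.List.pyGet? pvMessages ((pvBestGo findings 0 : Nat) : Int)).getD ""

-- ===== PRECONDITION & SPEC =====
-- Pre_ excludes findings whose dict lacks the 'score' key: there both A and B raise KeyError.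
def Pre_generate_guideline (findings : List (List (String × Int))) : Prop :=
  ∀ f ∈ findings, (PySem.Dict.mk f).contains "score" = true
instance (findings : List (List (String × Int))) : Decidable (Pre_generate_guideline findings) := by unfold Pre_generate_guideline; infer_instance

def pvWitness_generate_guideline : (List (List (String × Int))) := [[("score", 5)], [("score", 9)]]

def Spec_generate_guideline (findings : List (List (String × Int))) (out : String) : Prop := out = generate_guideline_alt findings
instance (findings : List (List (String × Int))) (out : String) : Decidable (Spec_generate_guideline findings out) := by unfold Spec_generate_guideline; infer_instance

-- ===== CLAIM =====
def Claim_equal_generate_guideline : Prop := ∀ (findings : List (List (String × Int))), Dom_generate_guideline findings → Pre_generate_guideline findings → Spec_generate_guideline findings (generate_guideline findings)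

-- ===== LEMMAS AND PROOFS =====

theorem pvLevel_le_four (s : Int) : pvLevel s ≤ 4 := by
  simp only [pvLevel, pvLevelGo]; split_ifs <;> omega

theorem pvLevel_mono : Monotone pvLevel := by
  intro a b h
  simp only [pvLevel, pvLevelGo]; split_ifs <;> omega

-- once the accumulator reaches 4, the fold stays at 4
theorem pv_fold_four (fs : List (List (String × Int))) :
    fs.foldl (fun a f => max a (pvLevel (pvScore f))) 4 = 4 := by
  induction fs with
  | nil => rfl
  | cons f rest ih =>
      have := pvLevel_le_four (pvScore f)
      simp [List.foldl, Nat.max_eq_left this, ih]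

-- the early-exit accumulator loop computes the running max of levels
theorem pvBestGo_eq_foldl (fs : List (List (String × Int))) (b : Nat) :
    pvBestGo fs b = fs.foldl (fun a f => max a (pvLevel (pvScore f))) b := by
  induction fs generalizing b with
  | nil => rfl
  | cons f rest ih =>
      simp only [pvBestGo, List.foldl]
      by_cases h : pvLevel (pvScore f) > b
      · simp only [h, if_true]
        by_cases h4 : pvLevel (pvScore f) = 4
        · rw [if_pos h4, h4, Nat.max_eq_right (le_of_lt (h4 ▸ h)), pv_fold_four]
        · rw [if_neg h4, Nat.max_eq_right (le_of_lt h), ih]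
      · simp only [h, if_false, Nat.max_eq_left (le_of_not_gt h), ih]

-- level commutes with max (monotone map), so the max level is the level of the max score
theorem pvLevel_foldl_max (a : Int) (l : List Int) :
    pvLevel (l.foldl max a) = l.foldl (fun acc x => max acc (pvLevel x)) (pvLevel a) := by
  induction l generalizing a with
  | nil => rfl
  | cons x t ih => simp [List.foldl, ih, pvLevel_mono.map_max]

-- A's cascade equals B's table lookup at the level of the max score
theorem pv_cascade_eq_table (m : Int) :
    (if m ≥ 10 then pvMsg10 else if m ≥ 8 then pvMsg8 else if m ≥ 5 then pvMsg5
     else if m ≥ 3 then pvMsg3 else pvMsgElse)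
    = (PySem.List.pyGet? pvMessages ((pvLevel m : Nat) : Int)).getD "" := by
  simp only [pvLevel, pvLevelGo]
  split_ifs <;> first | rfl | omega

-- ===== VERDICT =====
theorem generate_guideline_spec : Claim_equal_generate_guideline := by
  intro findings _ _
  unfold Spec_generate_guideline generate_guideline generate_guideline_alt
  cases findings with
  | nil => simp
  | cons f rest =>
      have hmax : (PySem.List.max? ((f :: rest).map pvScore) (fun x => x)).getD 0
          = (rest.map pvScore).foldl max (pvScore f) := by
        rw [List.map_cons, PySem.List.max?_id_cons, Option.getD_some]
      simp only [reduceCtorEq, if_false, hmax]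
      rw [pv_cascade_eq_table]
      congr 2
      rw [pvBestGo_eq_foldl, pvLevel_foldl_max, List.foldl_map, List.foldl_cons, Nat.zero_max]
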